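-- pv_equiv track=rewrite | github.com/Hanliang-David/leetcode | suibi/func_py_generate_fibonacci_triangle.py | func_py_generate_fibonacci_triangle
-- ===== SOURCE A (Python) =====
-- def func_py_generate_fibonacci_triangle(rows):
--     fibs = [0, 1]
--     while len(fibs) < rows * (rows + 1) // 2:
--         fibs.append(fibs[-1] + fibs[-2])
--     triangle = []
--     index = 0
--     for i in range(1, rows + 1):
--         row = fibs[index:index + i]
--         triangle.append(row)
--         index += i
--     return triangle
-- ===== SOURCE B (Python) =====
-- def func_py_generate_fibonacci_triangle(rows):
--     triangle = []
--     a, b = 0, 1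
--     for i in range(1, rows + 1):
--         row = []
--         for _ in range(i):
--             row.append(a)
--             a, b = b, a + b
--         triangle.append(row)
--     return triangle
-- ===== Notes on version B (the rewrite author's own statement) =====
-- stated objective: simpler
-- what changed: Drops the precomputed flat Fibonacci list and the index-slicing partition; instead maintains a running pair (a, b) and builds each row directly in one fused nested loop.
import Mathlib
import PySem

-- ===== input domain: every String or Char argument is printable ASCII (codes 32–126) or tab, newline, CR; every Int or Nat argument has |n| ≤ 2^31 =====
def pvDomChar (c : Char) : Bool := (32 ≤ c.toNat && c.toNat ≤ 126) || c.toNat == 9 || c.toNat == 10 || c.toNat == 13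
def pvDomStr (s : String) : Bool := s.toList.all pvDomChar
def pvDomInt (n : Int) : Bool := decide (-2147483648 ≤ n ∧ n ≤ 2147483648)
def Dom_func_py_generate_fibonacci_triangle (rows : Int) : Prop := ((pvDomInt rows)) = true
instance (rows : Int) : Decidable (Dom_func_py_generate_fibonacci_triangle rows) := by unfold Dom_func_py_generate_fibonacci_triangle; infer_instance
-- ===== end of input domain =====

-- B replaces A's precomputed flat Fibonacci list + index slicing by one fused nested loop
-- over a running pair (a, b); objective: simpler. Return values proved equal for all rows.


-- ===== PORT A =====
-- the while-loop: appends fibs[-1] + fibs[-2] once per iteration; it runs exactly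
-- (target - 2) times since len(fibs) starts at 2 and grows by 1 each pass
def pvFibExtend (fibs : List Int) : Nat → List Int
  | 0 => fibs
  | n + 1 =>
      pvFibExtend (fibs ++ [PySem.List.pyGetD fibs (-1) 0 + PySem.List.pyGetD fibs (-2) 0]) n

def func_py_generate_fibonacci_triangle (rows : Int) : List (List Int) :=
  let fibs := pvFibExtend [0, 1] (PySem.Int.floordiv (rows * (rows + 1)) 2 - 2).toNat
  ((PySem.List.pyRange 1 (rows + 1) 1).foldl
    (fun (st : List (List Int) × Int) i =>
      (st.1 ++ [PySem.List.slice fibs (some st.2) (some (st.2 + i))], st.2 + i))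
    ([], 0)).1

-- ===== PORT B =====
def func_py_generate_fibonacci_triangle_alt (rows : Int) : List (List Int) :=
  ((PySem.List.pyRange 1 (rows + 1) 1).foldl
    (fun (st : List (List Int) × Int × Int) i =>
      let r := (PySem.List.pyRange 0 i 1).foldl
        (fun (s : List Int × Int × Int) _ => (s.1 ++ [s.2.1], s.2.2, s.2.1 + s.2.2))
        ([], st.2)
      (st.1 ++ [r.1], r.2))
    ([], 0, 1)).1

-- ===== PRECONDITION & SPEC =====
def Spec_func_py_generate_fibonacci_triangle (rows : Int) (out : List (List Int)) : Prop := out = func_py_generate_fibonacci_triangle_alt rows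
instance (rows : Int) (out : List (List Int)) : Decidable (Spec_func_py_generate_fibonacci_triangle rows out) := by unfold Spec_func_py_generate_fibonacci_triangle; infer_instance

-- ===== CLAIM (what is proved, stated in full; the proofs are below) =====
def Claim_equal_func_py_generate_fibonacci_triangle : Prop := ∀ (rows : Int), Dom_func_py_generate_fibonacci_triangle rows → Spec_func_py_generate_fibonacci_triangle rows (func_py_generate_fibonacci_triangle rows)

-- ===== LEMMAS AND PROOFS =====

/-- The mathematical Fibonacci sequence 0, 1, 1, 2, 3, … over `Int`. -/
def pvFib : Nat → Int
  | 0 => 0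
  | 1 => 1
  | n + 2 => pvFib (n + 1) + pvFib n

/-- Triangular number `0+1+…+j`. -/
def pvTri (j : Nat) : Nat := j * (j + 1) / 2

lemma pvTri_succ (j : Nat) : pvTri (j + 1) = pvTri j + (j + 1) := by
  unfold pvTri
  have h : (j + 1) * (j + 1 + 1) = j * (j + 1) + 2 * (j + 1) := by ring
  omega

lemma pvTri_mono {i j : Nat} (h : i ≤ j) : pvTri i ≤ pvTri j := by
  unfold pvTri
  exact Nat.div_le_div_right (Nat.mul_le_mul h (by omega))

/-- A's while loop: extending the fib prefix of length `m + 2` by `fuel` steps. -/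
lemma pvFibExtend_eq (fuel : Nat) : ∀ m : Nat,
    pvFibExtend ((List.range (m + 2)).map pvFib) fuel = (List.range (m + 2 + fuel)).map pvFib := by
  induction fuel with
  | zero => intro m; rfl
  | succ n ih =>
      intro m
      have hlen : ((List.range (m + 2)).map pvFib).length = m + 2 := by simp
      have h1 : PySem.List.pyGetD ((List.range (m + 2)).map pvFib) (-1) 0 = pvFib (m + 1) := by
        rw [PySem.List.pyGetD_neg_ofNat _ 1 0 (by omega) (by omega)]
        simp [hlen]
      have h2 : PySem.List.pyGetD ((List.range (m + 2)).map pvFib) (-2) 0 = pvFib m := by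
        rw [PySem.List.pyGetD_neg_ofNat _ 2 0 (by omega) (by omega)]
        simp [hlen]
      show pvFibExtend _ n = _
      have happ : (List.range (m + 2)).map pvFib ++ [pvFib (m + 1) + pvFib m]
          = (List.range (m + 1 + 2)).map pvFib := by
        conv_rhs => rw [show m + 1 + 2 = (m + 2) + 1 from rfl, List.range_succ]
        rw [List.map_append, List.map_singleton,
          show pvFib (m + 2) = pvFib (m + 1) + pvFib m from rfl]
      rw [h1, h2, happ, ih (m + 1), show m + 1 + 2 + n = m + 2 + (n + 1) from by omega]

/-- Slicing a fib prefix yields a `range'` segment. -/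
lemma pvSlice_fib (L j i : Nat) (h : j + i ≤ L) :
    PySem.List.slice ((List.range L).map pvFib) (some (j : Int)) (some ((j : Int) + (i : Int)))
      = (List.range' j i).map pvFib := by
  rw [PySem.List.slice_natCast_add]
  rw [← List.map_drop, ← List.map_take]
  congr 1
  rw [List.range_eq_range', List.drop_range']
  simp only [Nat.zero_add, Nat.mul_one]
  rw [List.take_range'_of_length_ge (by omega)]

/-- B's inner row loop, started at fib pair `(pvFib k, pvFib (k+1))`. -/
lemma pvRowLoop (i : Nat) : ∀ k : Nat,
    (PySem.List.pyRange 0 (i : Int) 1).foldl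
      (fun (s : List Int × Int × Int) _ => (s.1 ++ [s.2.1], s.2.2, s.2.1 + s.2.2))
      ([], pvFib k, pvFib (k + 1))
    = ((List.range' k i).map pvFib, pvFib (k + i), pvFib (k + i + 1)) := by
  induction i with
  | zero => intro k; simp
  | succ n ih =>
      intro k
      have hsplit : PySem.List.pyRange 0 ((n : Int) + 1) 1
          = PySem.List.pyRange 0 (n : Int) 1 ++ [(n : Int)] :=
        PySem.List.pyRange_one_succ_right (by positivity)
      have hcast : ((n + 1 : Nat) : Int) = (n : Int) + 1 := by push_cast; ring
      rw [hcast, hsplit, List.foldl_append, ih k]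
      simp only [List.foldl_cons, List.foldl_nil]
      refine Prod.ext ?_ (Prod.ext ?_ ?_) <;> simp only
      · rw [List.range'_1_concat, List.map_append]; simp
      · rfl
      · show _ = pvFib ((k + n) + 2)
        rw [show pvFib ((k + n) + 2) = pvFib (k + n + 1) + pvFib (k + n) from rfl]
        ring

/-- Combined outer-loop invariant: after processing rows `1..n`, A's state is
    `(tri, pvTri n)` and B's state is `(tri, pvFib (pvTri n), pvFib (pvTri n + 1))`
    with the same triangle `tri`, provided the fib table covers `pvTri n`. -/
lemma pvOuter (n : Nat) (L : Nat) (hL : pvTri n ≤ L) :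
    ((PySem.List.pyRange 1 ((n : Int) + 1) 1).foldl
      (fun (st : List (List Int) × Int) i =>
        (st.1 ++ [PySem.List.slice ((List.range L).map pvFib) (some st.2) (some (st.2 + i))], st.2 + i))
      ([], 0)
    = ((List.range n).map (fun j => (List.range' (pvTri j) (j + 1)).map pvFib), (pvTri n : Int)))
    ∧
    ((PySem.List.pyRange 1 ((n : Int) + 1) 1).foldl
      (fun (st : List (List Int) × Int × Int) i =>
        let r := (PySem.List.pyRange 0 i 1).foldl
          (fun (s : List Int × Int × Int) _ => (s.1 ++ [s.2.1], s.2.2, s.2.1 + s.2.2))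
          ([], st.2)
        (st.1 ++ [r.1], r.2))
      ([], 0, 1)
    = ((List.range n).map (fun j => (List.range' (pvTri j) (j + 1)).map pvFib),
        pvFib (pvTri n), pvFib (pvTri n + 1))) := by
  induction n with
  | zero =>
      constructor <;> simp [pvTri, pvFib]
  | succ m ih =>
      have hm : pvTri m ≤ L := le_trans (pvTri_mono (by omega)) hL
      obtain ⟨ihA, ihB⟩ := ih hm
      have hsplit : PySem.List.pyRange 1 (((m + 1 : Nat) : Int) + 1) 1
          = PySem.List.pyRange 1 ((m : Int) + 1) 1 ++ [(m : Int) + 1] := by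
        have : ((m + 1 : Nat) : Int) + 1 = ((m : Int) + 1) + 1 := by push_cast; ring
        rw [this]
        exact PySem.List.pyRange_one_succ_right (by omega)
      have hTs : pvTri (m + 1) = pvTri m + (m + 1) := pvTri_succ m
      constructor
      · rw [hsplit, List.foldl_append, ihA]
        simp only [List.foldl_cons, List.foldl_nil]
        have hcast : ((pvTri m : Nat) : Int) + ((m : Int) + 1) = ((pvTri m : Nat) : Int) + ((m + 1 : Nat) : Int) := by
          push_cast; ring
        refine Prod.ext ?_ ?_ <;> simp only
        · rw [hcast, pvSlice_fib L (pvTri m) (m + 1) (by omega)]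
          rw [List.range_succ, List.map_append]
          simp
        · rw [hcast]; push_cast [hTs]; ring
      · rw [hsplit, List.foldl_append, ihB]
        simp only [List.foldl_cons, List.foldl_nil]
        have hcast : ((m : Int) + 1) = ((m + 1 : Nat) : Int) := by push_cast; ring
        rw [hcast, pvRowLoop (m + 1) (pvTri m)]
        refine Prod.ext ?_ (Prod.ext ?_ ?_) <;> simp only
        · rw [List.range_succ, List.map_append]
          simp
        · congr 1; omega
        · congr 1; omega

-- ===== VERDICT (by name: the statement is the Claim_ definition above) =====
theorem func_py_generate_fibonacci_triangle_spec : Claim_equal_func_py_generate_fibonacci_triangle := by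
  intro rows _
  show func_py_generate_fibonacci_triangle rows = func_py_generate_fibonacci_triangle_alt rows
  by_cases hneg : rows ≤ 0
  · -- no rows: both ranges are empty
    unfold func_py_generate_fibonacci_triangle func_py_generate_fibonacci_triangle_alt
    rw [PySem.List.pyRange_one_eq_nil (by omega)]
    rfl
  · rw [not_le] at hneg
    -- rows = n ≥ 1
    obtain ⟨n, rfl⟩ : ∃ n : Nat, rows = (n : Int) := ⟨rows.toNat, (Int.toNat_of_nonneg (by omega)).symm⟩
    -- the flat fib list A builds is the fib prefix of length L = max 2 (pvTri n)
    have htarget : PySem.Int.floordiv ((n : Int) * ((n : Int) + 1)) 2 = ((pvTri n : Nat) : Int) := by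
      have : (n : Int) * ((n : Int) + 1) = ((n * (n + 1) : Nat) : Int) := by push_cast; ring
      rw [this]
      exact_mod_cast PySem.Int.floordiv_natCast (n * (n + 1)) 2
    have hfuel : (((pvTri n : Nat) : Int) - 2).toNat = pvTri n - 2 := by omega
    have hfibs : pvFibExtend [0, 1] (PySem.Int.floordiv ((n : Int) * ((n : Int) + 1)) 2 - 2).toNat
        = (List.range (2 + (pvTri n - 2))).map pvFib := by
      rw [htarget, hfuel]
      have h2 : ([0, 1] : List Int) = (List.range (0 + 2)).map pvFib := by
        simp [List.range_succ, pvFib]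
      rw [h2, pvFibExtend_eq (pvTri n - 2) 0]
    have hL : pvTri n ≤ 2 + (pvTri n - 2) := by omega
    unfold func_py_generate_fibonacci_triangle func_py_generate_fibonacci_triangle_alt
    simp only [hfibs]
    obtain ⟨hA, hB⟩ := pvOuter n (2 + (pvTri n - 2)) hL
    rw [hA, hB]
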